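-- pv_equiv track=rewrite | github.com/solskogen/archlinux-aarch64-builder | repo_analyze.py | group_by_basename
-- ===== SOURCE A (Python) =====
-- def group_by_basename(packages):
--     """Group packages by basename, return (bases, by_basename, repo_count)"""
--     bases = {}
--     by_basename = {}
--     repo_count = {}
--
--     for pkg_name, pkg_data in packages.items():
--         basename = pkg_data['basename']
--         bases[basename] = pkg_data
--         by_basename.setdefault(basename, []).append(pkg_name)
--         repo_count.setdefault(basename, set()).add(pkg_data['repo'])
--
--     return bases, by_basename, repo_count
-- ===== SOURCE B (Python) =====
-- def group_by_basename(packages):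
--     """Group packages by basename, return (bases, by_basename, repo_count)"""
--     items = list(packages.items())
--     order = []
--     for _, pd in items:
--         b = pd['basename']
--         if b not in order:
--             order.append(b)
--     bases = {}
--     by_basename = {}
--     repo_count = {}
--     for b in order:
--         grp = [(name, pd) for name, pd in items if pd['basename'] == b]
--         bases[b] = grp[-1][1]
--         by_basename[b] = [name for name, _ in grp]
--         repo_count[b] = set(pd['repo'] for _, pd in grp)
--     return bases, by_basename, repo_count
-- ===== Notes on version B (the rewrite author's own statement) =====
-- stated objective: alternative
-- what changed: Replaces the single incremental pass that updates three dicts per package with a two-phase grouped strategy: first collect the distinct basenames in first-occurrence order, then for each basename materialize its member list once and fill all three dicts from that group (last member's data, member names, repo set).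
import Mathlib
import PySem

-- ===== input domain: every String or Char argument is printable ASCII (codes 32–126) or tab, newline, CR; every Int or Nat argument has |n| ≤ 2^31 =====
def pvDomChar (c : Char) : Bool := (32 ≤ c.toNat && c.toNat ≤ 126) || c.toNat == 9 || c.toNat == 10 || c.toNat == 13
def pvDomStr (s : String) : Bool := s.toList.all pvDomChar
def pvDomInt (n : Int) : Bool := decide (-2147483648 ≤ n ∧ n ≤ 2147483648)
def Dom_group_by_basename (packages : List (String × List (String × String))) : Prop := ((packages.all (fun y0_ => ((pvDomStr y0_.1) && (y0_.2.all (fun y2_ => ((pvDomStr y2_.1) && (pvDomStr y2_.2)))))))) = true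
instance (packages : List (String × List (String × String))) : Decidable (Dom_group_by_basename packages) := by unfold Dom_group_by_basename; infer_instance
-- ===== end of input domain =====

-- B replaces A's single incremental pass updating three dicts with a two-phase strategy
-- (collect distinct basenames in first-occurrence order, then fill all three dicts per group);
-- objective: alternative (same results, different algorithm, no speed claim).


-- ===== PORT A =====
-- One pass over packages.items(); pkg_data['basename'] / pkg_data['repo'] raise KeyError when
-- the key is missing (Pre_ excludes that); setdefault(b, []).append(n) is Dict.modify b [] (· ++ [n]),
-- setdefault(b, set()).add(r) is Dict.modify b Set.empty (Set.add · r).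
def group_by_basename (packages : List (String × List (String × String))) : (List (String × List (String × String))) × (List (String × List String)) × (List (String × List String)) :=
  let st := packages.foldl
    (fun (st : PySem.Dict String (List (String × String)) × PySem.Dict String (List String) × PySem.Dict String (PySem.Set String)) p =>
      match (PySem.Dict.mk p.2).get? "basename", (PySem.Dict.mk p.2).get? "repo" with
      | some b, some r =>
          (st.1.insert b p.2,
           st.2.1.modify b [] (fun l => l ++ [p.1]),
           st.2.2.modify b PySem.Set.empty (fun s => PySem.Set.add s r))
      | _, _ => st)
    (PySem.Dict.empty, PySem.Dict.empty, PySem.Dict.empty)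
  (st.1.items, st.2.1.items, st.2.2.items)

-- ===== PORT B =====
-- Phase 1: distinct basenames in first-occurrence order; phase 2: one group list per basename
-- feeds all three result dicts.  grp[-1] is getLastD (Source B only indexes nonempty groups);
-- the filterMap skips a missing 'repo' key, where Source B raises (outside Pre_).
def group_by_basename_alt (packages : List (String × List (String × String))) : (List (String × List (String × String))) × (List (String × List String)) × (List (String × List String)) :=
  let order : List String := packages.foldl
    (fun acc p =>
      match (PySem.Dict.mk p.2).get? "basename" with
      | some b => if b ∈ acc then acc else acc ++ [b]
      | none => acc) []
  let grp := fun (b : String) => packages.filter (fun p => (PySem.Dict.mk p.2).get? "basename" == some b)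
  (order.map (fun b => (b, ((grp b).map (fun p => p.2)).getLastD [])),
   order.map (fun b => (b, (grp b).map (fun p => p.1))),
   order.map (fun b => (b, PySem.Set.ofList ((grp b).filterMap (fun p => (PySem.Dict.mk p.2).get? "repo")))))

-- ===== PRECONDITION & SPEC =====
-- Pre_ excludes exactly the inputs where A raises KeyError: some pkg_data lacks 'basename' or 'repo'.
def Pre_group_by_basename (packages : List (String × List (String × String))) : Prop :=
  ∀ p ∈ packages, ((PySem.Dict.mk p.2).get? "basename").isSome = true ∧ ((PySem.Dict.mk p.2).get? "repo").isSome = true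
instance (packages : List (String × List (String × String))) : Decidable (Pre_group_by_basename packages) := by unfold Pre_group_by_basename; infer_instance
def pvWitness_group_by_basename : (List (String × List (String × String))) :=
  [("pkg-a", [("basename", "base"), ("repo", "core")]), ("pkg-b", [("basename", "base"), ("repo", "extra")])]
def Spec_group_by_basename (packages : List (String × List (String × String))) (out : (List (String × List (String × String))) × (List (String × List String)) × (List (String × List String))) : Prop := out = group_by_basename_alt packages
instance (packages : List (String × List (String × String))) (out : (List (String × List (String × String))) × (List (String × List String)) × (List (String × List String))) : Decidable (Spec_group_by_basename packages out) := by unfold Spec_group_by_basename; infer_instance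

-- ===== CLAIM (what is proved, stated in full; the proofs are below) =====
def Claim_equal_group_by_basename : Prop := ∀ (packages : List (String × List (String × String))), Dom_group_by_basename packages → Pre_group_by_basename packages → Spec_group_by_basename packages (group_by_basename packages)

-- ===== LEMMAS AND PROOFS =====

-- the basename / repo of a package entry (defined on Pre_-admitted entries, where get? is some)
def pvBname (p : String × List (String × String)) : String := (((PySem.Dict.mk p.2).get? "basename").getD "")
def pvRepo (p : String × List (String × String)) : String := (((PySem.Dict.mk p.2).get? "repo").getD "")

-- a fold over a triple of independent accumulators splits into three folds
lemma pv_foldl_triple {β σ₁ σ₂ σ₃ : Type} (f : σ₁ → β → σ₁) (g : σ₂ → β → σ₂) (h : σ₃ → β → σ₃)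
    (l : List β) (a : σ₁) (b : σ₂) (c : σ₃) :
    l.foldl (fun s e => (f s.1 e, g s.2.1 e, h s.2.2 e)) (a, b, c) = (l.foldl f a, l.foldl g b, l.foldl h c) := by
  induction l generalizing a b c with
  | nil => rfl
  | cons x l ih => simpa using ih (f a x) (g b x) (h c x)

-- getD after an insert-keyed fold: the LAST value written for that key
lemma pv_getD_foldl_insert {κ ν β : Type} [BEq κ] [LawfulBEq κ] [DecidableEq κ]
    (l : List β) (k : β → κ) (v : β → ν) (d : PySem.Dict κ ν) (c : κ) (dflt : ν) :
    (l.foldl (fun d a => d.insert (k a) (v a)) d).getD c dflt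
      = ((l.filter (fun a => k a == c)).map v).getLastD (d.getD c dflt) := by
  induction l generalizing d with
  | nil => rfl
  | cons a l ih =>
    rw [List.foldl_cons, ih]
    by_cases h : k a = c
    · subst h
      rw [List.filter_cons_of_pos (by simp), List.map_cons, List.getLastD_cons,
          PySem.Dict.getD_insert]
      simp
    · rw [List.filter_cons_of_neg (by simp [h]), PySem.Dict.getD_insert]
      simp [Ne.symm h]

-- getD after a Set.add-modify fold: the accumulated set of values for that key
lemma pv_getD_foldl_modify_add {κ β : Type} [BEq κ] [LawfulBEq κ] [DecidableEq κ]
    (l : List β) (k : β → κ) (r : β → String) (d : PySem.Dict κ (PySem.Set String)) (c : κ) :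
    (l.foldl (fun d a => d.modify (k a) PySem.Set.empty (fun s => PySem.Set.add s (r a))) d).getD c PySem.Set.empty
      = PySem.Set.update (d.getD c PySem.Set.empty) ((l.filter (fun a => k a == c)).map r) := by
  induction l generalizing d with
  | nil => rfl
  | cons a l ih =>
    rw [List.foldl_cons, ih]
    by_cases h : k a = c
    · subst h
      rw [List.filter_cons_of_pos (by simp), List.map_cons, PySem.Set.update_cons,
          PySem.Dict.getD_modify]
      simp
    · rw [List.filter_cons_of_neg (by simp [h]), PySem.Dict.getD_modify]
      simp [Ne.symm h]

theorem group_by_basename_spec : Claim_equal_group_by_basename := by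
  intro packages _ hpre
  unfold Spec_group_by_basename
  simp only [group_by_basename, group_by_basename_alt]
  -- under Pre_, every lookup in A's loop body succeeds: replace the match by a total body
  have hA : packages.foldl
      (fun (st : PySem.Dict String (List (String × String)) × PySem.Dict String (List String) × PySem.Dict String (PySem.Set String)) p =>
        match (PySem.Dict.mk p.2).get? "basename", (PySem.Dict.mk p.2).get? "repo" with
        | some b, some r =>
            (st.1.insert b p.2,
             st.2.1.modify b [] (fun l => l ++ [p.1]),
             st.2.2.modify b PySem.Set.empty (fun s => PySem.Set.add s r))
        | _, _ => st)
      (PySem.Dict.empty, PySem.Dict.empty, PySem.Dict.empty)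
      = packages.foldl
        (fun st p => ((fun d p => PySem.Dict.insert d (pvBname p) p.2) st.1 p,
                      (fun d p => PySem.Dict.modify d (pvBname p) [] (fun l => l ++ [p.1])) st.2.1 p,
                      (fun d p => PySem.Dict.modify d (pvBname p) PySem.Set.empty (fun s => PySem.Set.add s (pvRepo p))) st.2.2 p))
        (PySem.Dict.empty, PySem.Dict.empty, PySem.Dict.empty) := by
    apply PySem.List.foldl_congr_mem
    intro acc p hp
    obtain ⟨h1, h2⟩ := hpre p hp
    obtain ⟨b, hb⟩ := Option.isSome_iff_exists.mp h1
    obtain ⟨r, hr⟩ := Option.isSome_iff_exists.mp h2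
    simp [pvBname, pvRepo, hb, hr]
  rw [hA, pv_foldl_triple (fun d p => PySem.Dict.insert d (pvBname p) p.2)
        (fun d p => PySem.Dict.modify d (pvBname p) [] (fun l => l ++ [p.1]))
        (fun d p => PySem.Dict.modify d (pvBname p) PySem.Set.empty (fun s => PySem.Set.add s (pvRepo p)))
        packages PySem.Dict.empty PySem.Dict.empty PySem.Dict.empty]
  dsimp only
  -- B's first phase is the ordered set of basenames
  have horder : packages.foldl
      (fun acc p =>
        match (PySem.Dict.mk p.2).get? "basename" with
        | some b => if b ∈ acc then acc else acc ++ [b]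
        | none => acc) []
      = PySem.Set.ofList (packages.map pvBname) := by
    have hc : packages.foldl
        (fun acc p =>
          match (PySem.Dict.mk p.2).get? "basename" with
          | some b => if b ∈ acc then acc else acc ++ [b]
          | none => acc) []
        = packages.foldl (fun s p => PySem.Set.add s (pvBname p)) [] := by
      apply PySem.List.foldl_congr_mem
      intro acc p hp
      obtain ⟨b, hb⟩ := Option.isSome_iff_exists.mp (hpre p hp).1
      simp [hb, pvBname, PySem.Set.add_eq_ite]
    rw [hc, ← PySem.Set.update_map_eq_foldl_add, PySem.Set.update_nil_left]
  rw [horder]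
  -- B's group lists are the pvBname-filters
  have hgrp : ∀ b : String, packages.filter (fun p => (PySem.Dict.mk p.2).get? "basename" == some b)
      = packages.filter (fun p => pvBname p == b) := by
    intro b
    apply List.filter_congr
    intro p hp
    obtain ⟨x, hx⟩ := Option.isSome_iff_exists.mp (hpre p hp).1
    simp [hx, pvBname]
  -- the three key lists of A's dicts are all that same ordered set, and the keys are Nodup
  have hkB : (packages.foldl (fun d p => PySem.Dict.insert d (pvBname p) p.2) PySem.Dict.empty).keys
      = PySem.Set.ofList (packages.map pvBname) := by
    rw [PySem.Dict.keys_foldl_insert_key packages pvBname (fun _ p => p.2),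
        PySem.Dict.keys_empty, PySem.Set.update_nil_left]
  have hkN : (packages.foldl (fun d p => PySem.Dict.modify d (pvBname p) [] (fun l => l ++ [p.1])) PySem.Dict.empty).keys
      = PySem.Set.ofList (packages.map pvBname) := by
    rw [PySem.Dict.keys_foldl_modify_key packages pvBname [] (fun _ p l => l ++ [p.1]),
        PySem.Dict.keys_empty, PySem.Set.update_nil_left]
  have hkR : (packages.foldl (fun d p => PySem.Dict.modify d (pvBname p) PySem.Set.empty (fun s => PySem.Set.add s (pvRepo p))) PySem.Dict.empty).keys
      = PySem.Set.ofList (packages.map pvBname) := by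
    rw [PySem.Dict.keys_foldl_modify_key packages pvBname PySem.Set.empty (fun _ p s => PySem.Set.add s (pvRepo p)),
        PySem.Dict.keys_empty, PySem.Set.update_nil_left]
  have hndB := PySem.Dict.nodup_keys_foldl_insert_key packages pvBname (fun _ p => p.2) PySem.Dict.empty (by simp [PySem.Dict.keys_empty])
  have hndN := PySem.Dict.nodup_keys_foldl_modify_key packages pvBname [] (fun _ p l => l ++ [p.1]) PySem.Dict.empty (by simp [PySem.Dict.keys_empty])
  have hndR := PySem.Dict.nodup_keys_foldl_modify_key packages pvBname PySem.Set.empty (fun _ p s => PySem.Set.add s (pvRepo p)) PySem.Dict.empty (by simp [PySem.Dict.keys_empty])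
  refine Prod.ext ?_ (Prod.ext ?_ ?_)
  · -- bases: last pkg_data per basename
    rw [PySem.Dict.items_eq_map_keys _ hndB [], hkB]
    apply List.map_congr_left
    intro b _
    rw [pv_getD_foldl_insert packages pvBname (fun p => p.2) PySem.Dict.empty b []]
    simp [hgrp b]
  · -- by_basename: member names per basename
    rw [PySem.Dict.items_eq_map_keys _ hndN [], hkN]
    apply List.map_congr_left
    intro b _
    have hfold : packages.foldl (fun d p => PySem.Dict.modify d (pvBname p) [] (fun l => l ++ [p.1])) PySem.Dict.empty
        = (packages.map (fun p => (pvBname p, p.1))).foldl (fun d q => PySem.Dict.modify d q.1 [] (fun l => l ++ [q.2])) PySem.Dict.empty := by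
      rw [List.foldl_map]
    rw [hfold, PySem.Dict.getD_foldl_modify_append]
    simp [hgrp b, List.filter_map, Function.comp_def]
  · -- repo_count: set of repos per basename
    rw [PySem.Dict.items_eq_map_keys _ hndR PySem.Set.empty, hkR]
    apply List.map_congr_left
    intro b _
    rw [pv_getD_foldl_modify_add packages pvBname pvRepo PySem.Dict.empty b]
    have hfm : (packages.filter (fun p => (PySem.Dict.mk p.2).get? "basename" == some b)).filterMap (fun p => (PySem.Dict.mk p.2).get? "repo")
        = (packages.filter (fun p => pvBname p == b)).map pvRepo := by
      rw [hgrp b]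
      rw [List.filterMap_congr (g := fun p => some (pvRepo p)) ?_]
      · simp
      · intro p hp
        obtain ⟨r, hr⟩ := Option.isSome_iff_exists.mp (hpre p (List.mem_of_mem_filter hp)).2
        simp [hr, pvRepo]
    simp [hfm, PySem.Set.update_nil_left]
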